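-- pv_equiv track=rewrite | github.com/bioinsilico/rcsb-embedding-search | src/scripts/esm3_embeddings_from_rcsb.py | split_list_get_index
-- ===== SOURCE A (Python) =====
-- def split_list_get_index(lst, n, index):
--     """
--     Splits a list into N sublists and returns the sublist at the specified index.
--
--     Parameters:
--     - lst (list): The list to split.
--     - n (int): The number of sublists to create.
--     - index (int): The index of the sublist to return (0-based).
--
--     Returns:
--     - list: The sublist at the specified index.
--     """
--     if n <= 0:
--         raise ValueError("Number of sublists (n) must be greater than 0.")
--     if index < 0 or index >= n:
--         raise ValueError("Index is out of range for the number of sublists.")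
--
--     # Determine the size of each chunk
--     avg_size = len(lst) // n
--     remainder = len(lst) % n
--
--     # Generate sublists
--     sublists = []
--     start = 0
--     for i in range(n):
--         # Calculate end index based on remainder (distribute the extra items)
--         extra = 1 if i < remainder else 0
--         end = start + avg_size + extra
--         sublists.append(lst[start:end])
--         start = end
--
--     return sublists[index]
-- ===== SOURCE B (Python) =====
-- def split_list_get_index(lst, n, index):
--     if n <= 0:
--         raise ValueError("Number of sublists (n) must be greater than 0.")
--     if index < 0 or index >= n:
--         raise ValueError("Index is out of range for the number of sublists.")
--     avg, rem = divmod(len(lst), n)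
--     start = index * avg + min(index, rem)
--     end = start + avg + (1 if index < rem else 0)
--     return lst[start:end]
-- ===== Notes on version B (the rewrite author's own statement) =====
-- stated objective: faster
-- what changed: B computes the chunk's start/end offsets in closed form (start = index*avg + min(index, rem)) and slices only that chunk, instead of building all n sublists in a loop and indexing into them.
import Mathlib
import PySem

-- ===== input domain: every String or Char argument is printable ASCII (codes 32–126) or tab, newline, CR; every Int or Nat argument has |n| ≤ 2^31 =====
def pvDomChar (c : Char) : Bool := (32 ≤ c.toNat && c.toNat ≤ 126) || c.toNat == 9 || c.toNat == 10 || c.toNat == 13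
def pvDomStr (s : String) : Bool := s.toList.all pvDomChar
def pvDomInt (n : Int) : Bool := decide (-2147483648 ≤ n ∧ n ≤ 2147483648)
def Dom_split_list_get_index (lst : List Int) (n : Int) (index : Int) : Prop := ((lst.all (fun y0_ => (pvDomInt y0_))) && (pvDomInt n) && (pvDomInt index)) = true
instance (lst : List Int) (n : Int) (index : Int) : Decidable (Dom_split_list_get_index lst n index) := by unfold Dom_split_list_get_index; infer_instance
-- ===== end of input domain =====

-- B computes the requested chunk's start/end offsets in closed form and slices once, instead of building all n sublists in a loop and indexing into them.

-- ===== PORT A =====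
def split_list_get_index (lst : List Int) (n : Int) (index : Int) : List Int :=
  let avg := PySem.Int.floordiv (lst.length : Int) n
  let rem := PySem.Int.mod (lst.length : Int) n
  let res := (PySem.List.pyRange 0 n 1).foldl
    (fun (st : Array (List Int) × Int) i =>
      let extra : Int := if i < rem then 1 else 0
      let e := st.2 + avg + extra
      (st.1.push (PySem.List.slice lst (some st.2) (some e)), e))
    (#[], 0)
  -- sublists[index]; Pre_ guarantees the index is in range, so pyGet? is some
  (PySem.List.pyGet? res.1.toList index).getD []

-- ===== PORT B =====
def split_list_get_index_alt (lst : List Int) (n : Int) (index : Int) : List Int :=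
  let avg := PySem.Int.floordiv (lst.length : Int) n
  let rem := PySem.Int.mod (lst.length : Int) n
  let start := index * avg + min index rem
  let stop := start + avg + (if index < rem then 1 else 0)
  PySem.List.slice lst (some start) (some stop)

-- ===== PRECONDITION & SPEC =====
-- A raises ValueError unless 0 < n and 0 ≤ index < n; Pre_ is exactly those inputs.
def Pre_split_list_get_index (lst : List Int) (n : Int) (index : Int) : Prop :=
  0 < n ∧ 0 ≤ index ∧ index < n
instance (lst : List Int) (n : Int) (index : Int) : Decidable (Pre_split_list_get_index lst n index) := by unfold Pre_split_list_get_index; infer_instance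

def pvWitness_split_list_get_index : List Int × Int × Int := ([1, 2, 3, 4, 5], 2, 1)

def Spec_split_list_get_index (lst : List Int) (n : Int) (index : Int) (out : List Int) : Prop := out = split_list_get_index_alt lst n index
instance (lst : List Int) (n : Int) (index : Int) (out : List Int) : Decidable (Spec_split_list_get_index lst n index out) := by unfold Spec_split_list_get_index; infer_instance

-- ===== CLAIM (what is proved, stated in full; the proofs are below) =====
def Claim_equal_split_list_get_index : Prop := ∀ (lst : List Int) (n : Int) (index : Int), Dom_split_list_get_index lst n index → Pre_split_list_get_index lst n index → Spec_split_list_get_index lst n index (split_list_get_index lst n index)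

-- ===== LEMMAS AND PROOFS =====

-- the running start of A's loop, in closed form
def pvOff (avg rem i : Int) : Int := i * avg + min i rem

-- the chunks A's loop appends, as a recursion over the remaining range with the running start
def pvGo (lst : List Int) (avg rem : Int) : List Int → Int → List (List Int)
  | [], _ => []
  | i :: r, s =>
      PySem.List.slice lst (some s) (some (s + avg + (if i < rem then 1 else 0))) ::
        pvGo lst avg rem r (s + avg + (if i < rem then 1 else 0))

theorem pvFold_eq (lst : List Int) (avg rem : Int) :
    ∀ (r : List Int) (acc : Array (List Int)) (s : Int),
      (r.foldl
        (fun (st : Array (List Int) × Int) i =>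
          let extra : Int := if i < rem then 1 else 0
          let e := st.2 + avg + extra
          (st.1.push (PySem.List.slice lst (some st.2) (some e)), e)) (acc, s)).1.toList
      = acc.toList ++ pvGo lst avg rem r s := by
  intro r
  induction r with
  | nil => intro acc s; simp [pvGo]
  | cons i r ih => intro acc s; simp [pvGo, ih]

theorem pvOff_succ (avg rem i : Int) :
    pvOff avg rem (i + 1) = pvOff avg rem i + avg + (if i < rem then 1 else 0) := by
  unfold pvOff
  have h : (i + 1) * avg = i * avg + avg := by ring
  split_ifs with hlt <;> omega

theorem pvRange_nil (a b : Int) (h : ¬ a < b) : PySem.List.pyRange a b 1 = [] := by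
  have hl : (PySem.List.pyRange a b 1).length = 0 := by
    rw [PySem.List.length_pyRange_one]; omega
  exact List.length_eq_zero_iff.mp hl

theorem pvGo_range (lst : List Int) (avg rem n : Int) :
    ∀ (k : Int),
      pvGo lst avg rem (PySem.List.pyRange k n 1) (pvOff avg rem k)
      = (PySem.List.pyRange k n 1).map
          (fun i => PySem.List.slice lst (some (pvOff avg rem i)) (some (pvOff avg rem (i + 1)))) := by
  intro k
  by_cases h : k < n
  · generalize hm : (n - k).toNat = m
    induction m generalizing k with
    | zero => omega
    | succ m ih =>
      rw [PySem.List.pyRange_one_cons h]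
      simp only [pvGo, List.map_cons]
      rw [← pvOff_succ]
      by_cases h' : k + 1 < n
      · rw [ih (k + 1) h' (by omega)]
      · rw [pvRange_nil _ _ h']
        simp [pvGo]
  · rw [pvRange_nil _ _ h]
    simp [pvGo]

theorem pvGo_range0 (lst : List Int) (avg rem n : Int) (hrem : 0 ≤ rem) :
    pvGo lst avg rem (PySem.List.pyRange 0 n 1) 0
      = (PySem.List.pyRange 0 n 1).map
          (fun i => PySem.List.slice lst (some (pvOff avg rem i)) (some (pvOff avg rem (i + 1)))) := by
  have h0 : pvOff avg rem 0 = 0 := by simp [pvOff]; omega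
  have h := pvGo_range lst avg rem n 0
  rw [h0] at h
  exact h

theorem pvGet_map_range (f : Int → List Int) (n index : Int)
    (h0 : 0 ≤ index) (h1 : index < n) :
    (PySem.List.pyGet? ((PySem.List.pyRange 0 n 1).map f) index).getD [] = f index := by
  have hidx : index.toNat < ((PySem.List.pyRange 0 n 1).map f).length := by
    simp [PySem.List.length_pyRange_one]; omega
  rw [show index = ((index.toNat : Nat) : Int) by omega, PySem.List.pyGet?_natCast,
    List.getElem?_eq_getElem hidx]
  simp only [Option.getD_some, List.getElem_map]
  rw [PySem.List.getElem_pyRange_one]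
  congr 1
  omega

theorem pvMain (lst : List Int) (avg rem n index : Int) (hrem : 0 ≤ rem)
    (hi0 : 0 ≤ index) (hin : index < n) :
    (PySem.List.pyGet?
        ((PySem.List.pyRange 0 n 1).foldl
          (fun (st : Array (List Int) × Int) i =>
            let extra : Int := if i < rem then 1 else 0
            let e := st.2 + avg + extra
            (st.1.push (PySem.List.slice lst (some st.2) (some e)), e)) (#[], 0)).1.toList index).getD []
    = PySem.List.slice lst (some (index * avg + min index rem))
        (some (index * avg + min index rem + avg + (if index < rem then 1 else 0))) := by
  rw [pvFold_eq, List.nil_append, pvGo_range0 lst avg rem n hrem,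
    pvGet_map_range _ n index hi0 hin, pvOff_succ]
  simp [pvOff]

-- ===== VERDICT (by name: the statement is the Claim_ definition above) =====
theorem split_list_get_index_spec : Claim_equal_split_list_get_index := by
  intro lst n index _ hpre
  obtain ⟨hn, hi0, hin⟩ := hpre
  unfold Spec_split_list_get_index
  exact pvMain lst (PySem.Int.floordiv (lst.length : Int) n)
    (PySem.Int.mod (lst.length : Int) n) n index
    (PySem.Int.mod_nonneg _ hn) hi0 hin
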